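-- pv_equiv track=rewrite | github.com/AveiaPodre/Metodos_Ordena-o_PAA | heap_sort.py | constroiHeapMax
-- ===== SOURCE A (Python) =====
-- def constroiHeapMax(A):
--     tamHeap = len(A)
--     i = tamHeap // 2 - 1
--     comparacoes = 0
--
--     while i >= 0:
--         comparacoes += refazHeapMax(A, i, tamHeap)
--         i -= 1
--
--     return comparacoes
--
-- def refazHeapMax(A, i, tamHeap):
--     esquerda = 2 * i + 1
--     direita = 2 * i + 2
--     maior = i
--     comparacoes = 0
--
--     if esquerda < tamHeap and A[esquerda] > A[maior]:
--         maior = esquerda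
--     if direita < tamHeap and A[direita] > A[maior]:
--         maior = direita
--
--     if maior != i:
--         A[i], A[maior] = A[maior], A[i]
--         comparacoes += 1  # Incrementa a contagem de comparações
--         comparacoes += refazHeapMax(A, maior, tamHeap)
--
--     return comparacoes
-- ===== SOURCE B (Python) =====
-- def constroiHeapMax(A):
--     tamHeap = len(A)
--     comparacoes = 0
--     for i in range(tamHeap // 2 - 1, -1, -1):
--         comparacoes += siftDownIter(A, i, tamHeap)
--     return comparacoes
--
-- def siftDownIter(A, i, tamHeap):
--     trocas = 0
--     while True:
--         esquerda = 2 * i + 1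
--         direita = 2 * i + 2
--         maior = i
--         if esquerda < tamHeap and A[esquerda] > A[maior]:
--             maior = esquerda
--         if direita < tamHeap and A[direita] > A[maior]:
--             maior = direita
--         if maior == i:
--             return trocas
--         A[i], A[maior] = A[maior], A[i]
--         trocas += 1
--         i = maior
-- ===== Notes on version B (the rewrite author's own statement) =====
-- stated objective: alternative
-- what changed: refazHeapMax's recursive sift-down (one call per swap, summed on return) is replaced by an iterative sift-down with a while-loop and an accumulator, and the outer while-loop becomes a for over a descending range; same O(n) heap construction, no call-stack depth.
import Mathlib
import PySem

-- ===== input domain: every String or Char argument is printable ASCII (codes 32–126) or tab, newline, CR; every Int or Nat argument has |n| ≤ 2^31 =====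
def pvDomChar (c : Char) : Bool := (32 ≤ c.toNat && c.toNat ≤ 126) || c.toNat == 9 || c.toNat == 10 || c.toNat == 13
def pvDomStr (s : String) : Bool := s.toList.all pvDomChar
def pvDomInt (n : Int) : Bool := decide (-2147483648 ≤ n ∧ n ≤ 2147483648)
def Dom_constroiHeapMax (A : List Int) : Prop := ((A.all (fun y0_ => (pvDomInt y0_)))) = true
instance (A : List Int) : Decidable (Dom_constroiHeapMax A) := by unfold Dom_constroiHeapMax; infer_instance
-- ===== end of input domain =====

-- B replaces A's recursive sift-down (refazHeapMax) by an iterative while-loop sift-down with an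
-- accumulator, and the outer while by a for over a descending range (objective: alternative).
-- Both Pythons mutate A in place identically; the equivalence proved here is about the return value.
-- Recursions carry a fuel argument purely as a totality guard: the index strictly increases and stays
-- below tamHeap, so fuel = tamHeap never runs out on the calls the ports make.

-- ===== PORT A =====
-- refazHeapMax: indices are naturals (the outer loop only calls it with 0 ≤ i < tamHeap,
-- tamHeap = len A), so all A[...] accesses are in range and List.getD/List.set are exact.
def refazHeapMax (fuel : Nat) (A : List Int) (i tamHeap : Nat) : List Int × Int :=
  match fuel with
  | 0 => (A, 0)  -- unreachable: each recursive call strictly increases i below tamHeap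
  | fuel + 1 =>
    let esquerda := 2 * i + 1
    let direita := 2 * i + 2
    let m0 := i
    let m1 := if esquerda < tamHeap ∧ A.getD esquerda 0 > A.getD m0 0 then esquerda else m0
    let m2 := if direita < tamHeap ∧ A.getD direita 0 > A.getD m1 0 then direita else m1
    if m2 ≠ i then
      -- A[i], A[maior] = A[maior], A[i]
      let A' := (A.set i (A.getD m2 0)).set m2 (A.getD i 0)
      let r := refazHeapMax fuel A' m2 tamHeap
      (r.1, 1 + r.2)
    else
      (A, 0)

-- the 'while i >= 0' loop of constroiHeapMax, with state (A, comparacoes); fuel = number of iterations left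
def constroiLoopA (fuel : Nat) (A : List Int) (tamHeap : Nat) (i : Int) (comparacoes : Int) : Int :=
  match fuel with
  | 0 => comparacoes  -- unreachable: fuel starts at (i+1).toNat, the exact iteration count
  | fuel + 1 =>
    if i ≥ 0 then
      let r := refazHeapMax tamHeap A i.toNat tamHeap
      constroiLoopA fuel r.1 tamHeap (i - 1) (comparacoes + r.2)
    else
      comparacoes

def constroiHeapMax (A : List Int) : Int :=
  constroiLoopA (((A.length / 2 : Nat) : Int)).toNat A A.length (((A.length / 2 : Nat) : Int) - 1) 0

-- ===== PORT B =====
-- iterative sift-down: while True, pick the larger child, stop when maior == i, else swap and descend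
def siftDownIter (fuel : Nat) (A : List Int) (i tamHeap : Nat) (trocas : Int) : List Int × Int :=
  match fuel with
  | 0 => (A, trocas)  -- unreachable: the loop index strictly increases below tamHeap
  | fuel + 1 =>
    let esquerda := 2 * i + 1
    let direita := 2 * i + 2
    let m0 := i
    let m1 := if esquerda < tamHeap ∧ A.getD esquerda 0 > A.getD m0 0 then esquerda else m0
    let m2 := if direita < tamHeap ∧ A.getD direita 0 > A.getD m1 0 then direita else m1
    if m2 = i then
      (A, trocas)
    else
      siftDownIter fuel ((A.set i (A.getD m2 0)).set m2 (A.getD i 0)) m2 tamHeap (trocas + 1)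

-- for i in range(tamHeap//2 - 1, -1, -1): a left fold over the descending index list
def constroiHeapMax_alt (A : List Int) : Int :=
  ((List.range (A.length / 2)).reverse.foldl
    (fun st i => siftDownIter A.length st.1 i A.length st.2) (A, (0 : Int))).2

-- ===== PRECONDITION & SPEC =====
def Spec_constroiHeapMax (A : List Int) (out : Int) : Prop := out = constroiHeapMax_alt A
instance (A : List Int) (out : Int) : Decidable (Spec_constroiHeapMax A out) := by unfold Spec_constroiHeapMax; infer_instance

-- ===== CLAIM (what is proved, stated in full; the proofs are below) =====
def Claim_equal_constroiHeapMax : Prop := ∀ (A : List Int), Dom_constroiHeapMax A → Spec_constroiHeapMax A (constroiHeapMax A)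

-- ===== LEMMAS AND PROOFS =====

-- the iterative sift-down is the recursive one with an accumulator (for every fuel: both truncate alike)
theorem siftDownIter_eq (fuel : Nat) : ∀ (A : List Int) (i tamHeap : Nat) (trocas : Int),
    siftDownIter fuel A i tamHeap trocas
      = ((refazHeapMax fuel A i tamHeap).1, trocas + (refazHeapMax fuel A i tamHeap).2) := by
  induction fuel with
  | zero => intro A i tamHeap trocas; simp [siftDownIter, refazHeapMax]
  | succ f ih =>
    intro A i tamHeap trocas
    rw [siftDownIter, refazHeapMax]
    by_cases h : (if 2 * i + 2 < tamHeap ∧ A.getD (2 * i + 2) 0 > A.getD (if 2 * i + 1 < tamHeap ∧ A.getD (2 * i + 1) 0 > A.getD i 0 then 2 * i + 1 else i) 0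
        then 2 * i + 2 else if 2 * i + 1 < tamHeap ∧ A.getD (2 * i + 1) 0 > A.getD i 0 then 2 * i + 1 else i) = i
    · simp only [if_pos h, if_neg (not_not_intro h)]
      simp
    · simp only [if_neg h, if_pos h, ih]
      simp only [Prod.mk.injEq, true_and]
      ring

-- the 'while i >= 0' loop starting at (n : Int) - 1 with fuel n equals the fold over (range n).reverse
theorem constroiLoopA_eq (n : Nat) : ∀ (A : List Int) (tamHeap : Nat) (comparacoes : Int),
    constroiLoopA n A tamHeap ((n : Int) - 1) comparacoes =
      ((List.range n).reverse.foldl (fun st i => siftDownIter tamHeap st.1 i tamHeap st.2) (A, comparacoes)).2 := by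
  induction n with
  | zero => intro A tamHeap c; simp [constroiLoopA]
  | succ m ih =>
    intro A tamHeap c
    rw [constroiLoopA, if_pos (by omega : ((m + 1 : Nat) : Int) - 1 ≥ 0)]
    have h1 : (((m + 1 : Nat) : Int) - 1).toNat = m := by omega
    have h2 : ((m + 1 : Nat) : Int) - 1 - 1 = (m : Int) - 1 := by omega
    rw [h1, h2, ih]
    rw [List.range_succ, List.reverse_append]
    simp only [List.reverse_singleton, List.singleton_append, List.foldl_cons]
    rw [siftDownIter_eq]

theorem constroiHeapMax_eq_alt (A : List Int) : constroiHeapMax A = constroiHeapMax_alt A := by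
  unfold constroiHeapMax constroiHeapMax_alt
  have := constroiLoopA_eq (A.length / 2) A A.length 0
  simpa using this

-- ===== VERDICT (by name: the statement is the Claim_ definition above) =====
theorem constroiHeapMax_spec : Claim_equal_constroiHeapMax := by
  intro A _
  unfold Spec_constroiHeapMax
  exact constroiHeapMax_eq_alt A
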